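-- pv_equiv track=rewrite | github.com/philip928lin/Flood-Risks-of-Cyber-physical-Attacks-in-a-Smart-Storm-Water-System | lqg_controller.py | form_node_index
-- ===== SOURCE A (Python) =====
-- def form_node_index(nodes, storages, junctions, links, delay_n):
--     """
--     Form node index dictionary for building A Bu Bw C matrices.
--
--     Parameters
--     ----------
--     nodes : list
--         Ordered node (storages and junctions) list.
--     storages : list
--     junctions : list
--     delay_n : list
--         No. delay segments for each junction.
--     Returns
--     -------
--     node_index : dict
--
--     """
--     node_index = {}
--     acc_i = 0
--     for n in nodes:
--         if n in storages:
--             node_index[n] = (acc_i, acc_i)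
--             acc_i += 1
--         else: # junctions
--             dn = delay_n[junctions.index(n)]
--             node_index[n] = (acc_i, acc_i+dn-1)
--             acc_i += dn
--     return node_index
-- ===== SOURCE B (Python) =====
-- def form_node_index(nodes, storages, junctions, links, delay_n):
--     # widths pass: 1 slot per storage, delay_n width per junction (lazy .index)
--     widths = [1 if n in storages else delay_n[junctions.index(n)] for n in nodes]
--     # exclusive prefix sums -> starting offset of each node
--     starts = [0]
--     for w in widths:
--         starts.append(starts[-1] + w)
--     return {n: (s, s + w - 1) for n, s, w in zip(nodes, starts, widths)}
-- ===== Notes on version B (the rewrite author's own statement) =====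
-- stated objective: alternative
-- what changed: Replaces A's single loop with an inline running accumulator by a three-stage decomposition: a widths pass (1 per storage, lazy delay_n[junctions.index(n)] per junction), an exclusive prefix-sum table of starting offsets, and a final zip building the dict.
import Mathlib
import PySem

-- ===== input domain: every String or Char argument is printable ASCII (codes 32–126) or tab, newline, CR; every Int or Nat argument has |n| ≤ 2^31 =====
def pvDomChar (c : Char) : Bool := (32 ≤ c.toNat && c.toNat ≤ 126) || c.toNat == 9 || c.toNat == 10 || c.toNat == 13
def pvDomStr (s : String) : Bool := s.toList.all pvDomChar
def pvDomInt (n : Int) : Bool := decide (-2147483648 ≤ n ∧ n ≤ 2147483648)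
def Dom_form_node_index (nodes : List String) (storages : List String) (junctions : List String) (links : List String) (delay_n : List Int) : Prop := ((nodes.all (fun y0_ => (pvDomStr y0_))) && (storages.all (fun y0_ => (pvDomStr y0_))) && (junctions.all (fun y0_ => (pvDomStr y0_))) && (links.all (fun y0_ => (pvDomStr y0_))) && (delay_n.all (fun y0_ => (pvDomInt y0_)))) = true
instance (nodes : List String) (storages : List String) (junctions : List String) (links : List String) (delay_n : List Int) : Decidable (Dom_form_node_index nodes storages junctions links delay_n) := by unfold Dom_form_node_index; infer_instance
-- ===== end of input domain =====

-- B: separate widths pass + exclusive prefix-sum offsets instead of A's inline running accumulator (objective: alternative decomposition, same cost).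

-- ===== PORT A =====
-- A's single loop with a running accumulator; the Option state is `none` exactly where Python raises.
def form_node_index (nodes : List String) (storages : List String) (junctions : List String) (links : List String) (delay_n : List Int) : List (String × Int × Int) :=
  ((nodes.foldl (fun (st : Option (PySem.Dict String (Int × Int) × Int)) n =>
      st.bind (fun p =>
        if storages.contains n then
          some (p.1.insert n (p.2, p.2), p.2 + 1)
        else
          (PySem.List.index? junctions n).bind (fun j =>
            (PySem.List.pyGet? delay_n (j : Int)).map (fun dn =>
              (p.1.insert n (p.2, p.2 + dn - 1), p.2 + dn)))))
    (some (PySem.Dict.empty, 0))).map (fun p => p.1.items)).getD []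

-- ===== PORT B =====
def form_node_index_alt (nodes : List String) (storages : List String) (junctions : List String) (links : List String) (delay_n : List Int) : List (String × Int × Int) :=
  match nodes.mapM (fun n =>
      if storages.contains n then some (1 : Int)
      else (PySem.List.index? junctions n).bind (fun j => PySem.List.pyGet? delay_n (j : Int))) with
  | none => []
  | some widths =>
    let starts := widths.foldl (fun s w => s ++ [(PySem.List.pyGet? s (-1)).getD 0 + w]) [(0 : Int)]
    ((nodes.zip (starts.zip widths)).foldl
        (fun (d : PySem.Dict String (Int × Int)) p => d.insert p.1 (p.2.1, p.2.1 + p.2.2 - 1))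
        PySem.Dict.empty).items

-- ===== PRECONDITION & SPEC =====
-- Pre_ excludes exactly the inputs on which the Python A raises (ValueError from junctions.index
-- for a node in neither storages nor junctions, or IndexError from delay_n[...]).
def Pre_form_node_index (nodes : List String) (storages : List String) (junctions : List String) (links : List String) (delay_n : List Int) : Prop :=
  ∀ n ∈ nodes, storages.contains n = false → n ∈ junctions ∧ junctions.idxOf n < delay_n.length
instance (nodes : List String) (storages : List String) (junctions : List String) (links : List String) (delay_n : List Int) : Decidable (Pre_form_node_index nodes storages junctions links delay_n) := by unfold Pre_form_node_index; infer_instance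

def pvWitness_form_node_index : List String × List String × List String × List String × List Int :=
  (["s1", "j1", "j2"], ["s1"], ["j1", "j2"], [], [3, 2])

def Spec_form_node_index (nodes : List String) (storages : List String) (junctions : List String) (links : List String) (delay_n : List Int) (out : List (String × Int × Int)) : Prop := out = form_node_index_alt nodes storages junctions links delay_n
instance (nodes : List String) (storages : List String) (junctions : List String) (links : List String) (delay_n : List Int) (out : List (String × Int × Int)) : Decidable (Spec_form_node_index nodes storages junctions links delay_n out) := by unfold Spec_form_node_index; infer_instance

-- ===== CLAIM (what is proved, stated in full; the proofs are below) =====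
def Claim_equal_form_node_index : Prop := ∀ (nodes : List String) (storages : List String) (junctions : List String) (links : List String) (delay_n : List Int), Dom_form_node_index nodes storages junctions links delay_n → Pre_form_node_index nodes storages junctions links delay_n → Spec_form_node_index nodes storages junctions links delay_n (form_node_index nodes storages junctions links delay_n)

-- ===== LEMMAS AND PROOFS =====

-- width of a node (1 for storages, the looked-up delay for junctions; 0 unreachable under Pre_)
def pvWidth (storages junctions : List String) (delay_n : List Int) (n : String) : Int :=
  if storages.contains n then 1
  else ((PySem.List.index? junctions n).bind (fun j => PySem.List.pyGet? delay_n (j : Int))).getD 0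

-- the common shape both ports reduce to
def pvBuild (storages junctions : List String) (delay_n : List Int)
    (d : PySem.Dict String (Int × Int)) (acc : Int) : List String → PySem.Dict String (Int × Int)
  | [] => d
  | n :: t =>
    let w := pvWidth storages junctions delay_n n
    pvBuild storages junctions delay_n (d.insert n (acc, acc + w - 1)) (acc + w) t

theorem pvWidth_some (storages junctions : List String) (delay_n : List Int) (n : String)
    (hn : storages.contains n = false → n ∈ junctions ∧ junctions.idxOf n < delay_n.length) :
    (if storages.contains n then some (1 : Int)
     else (PySem.List.index? junctions n).bind (fun j => PySem.List.pyGet? delay_n (j : Int)))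
      = some (pvWidth storages junctions delay_n n) := by
  unfold pvWidth
  by_cases hs : storages.contains n = true
  · simp only [hs, if_true]
  · have hs' : storages.contains n = false := by simpa using hs
    obtain ⟨hmem, hlt⟩ := hn hs'
    have h1 : List.idxOf? n junctions = some (junctions.idxOf n) := by
      obtain ⟨k, hk⟩ := Option.isSome_iff_exists.mp (List.isSome_idxOf?.mpr hmem)
      have h2 := List.idxOf_eq_getD_idxOf? n junctions
      rw [hk] at h2 ⊢
      simp only [Option.getD_some] at h2
      rw [h2]
    simp only [hs', Bool.false_eq_true, if_false]
    rw [PySem.List.index?_eq_idxOf?, h1]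
    simp [PySem.List.pyGet?_natCast, List.getElem?_eq_getElem hlt]

theorem pvFoldA (storages junctions : List String) (delay_n : List Int) :
    ∀ (nodes : List String), (∀ n ∈ nodes, storages.contains n = false → n ∈ junctions ∧ junctions.idxOf n < delay_n.length) →
    ∀ (d : PySem.Dict String (Int × Int)) (acc : Int),
    ∃ accF : Int,
    (nodes.foldl (fun (st : Option (PySem.Dict String (Int × Int) × Int)) n =>
      st.bind (fun p =>
        if storages.contains n then
          some (p.1.insert n (p.2, p.2), p.2 + 1)
        else
          (PySem.List.index? junctions n).bind (fun j =>
            (PySem.List.pyGet? delay_n (j : Int)).map (fun dn =>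
              (p.1.insert n (p.2, p.2 + dn - 1), p.2 + dn)))))
      (some (d, acc)))
    = some (pvBuild storages junctions delay_n d acc nodes, accF) := by
  intro nodes
  induction nodes with
  | nil => intro _ d acc; exact ⟨acc, by simp [pvBuild]⟩
  | cons n t ih =>
    intro hpre d acc
    have hpre' : ∀ m ∈ t, storages.contains m = false → m ∈ junctions ∧ junctions.idxOf m < delay_n.length :=
      fun m hm => hpre m (List.mem_cons_of_mem _ hm)
    have hn := pvWidth_some storages junctions delay_n n (hpre n List.mem_cons_self)
    by_cases hs : storages.contains n = true
    · have hw : pvWidth storages junctions delay_n n = 1 := by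
        have := hn; rw [if_pos hs] at this; exact (Option.some.injEq _ _).mp this.symm ▸ rfl
      obtain ⟨accF, hF⟩ := ih hpre' (d.insert n (acc, acc)) (acc + 1)
      refine ⟨accF, ?_⟩
      simp only [List.foldl_cons, Option.bind_some, hs, if_true, hF, pvBuild, hw]
      have h1 : acc + (1:Int) - 1 = acc := by ring
      rw [h1]
    · have hs' : storages.contains n = false := by simpa using hs
      rw [if_neg hs] at hn
      obtain ⟨j, hj, hg⟩ := Option.bind_eq_some_iff.mp hn
      set w := pvWidth storages junctions delay_n n with hwdef
      obtain ⟨accF, hF⟩ := ih hpre' (d.insert n (acc, acc + w - 1)) (acc + w)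
      refine ⟨accF, ?_⟩
      simp only [List.foldl_cons, Option.bind_some, hs', Bool.false_eq_true, if_false, hj,
        Option.bind_some, hg, Option.map_some]
      simpa [pvBuild, ← hwdef] using hF

-- mapM over nodes succeeds under Pre_ and returns exactly the widths
theorem pvMapM (storages junctions : List String) (delay_n : List Int) :
    ∀ (nodes : List String), (∀ n ∈ nodes, storages.contains n = false → n ∈ junctions ∧ junctions.idxOf n < delay_n.length) →
    nodes.mapM (fun n =>
      if storages.contains n then some (1 : Int)
      else (PySem.List.index? junctions n).bind (fun j => PySem.List.pyGet? delay_n (j : Int)))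
      = some (nodes.map (pvWidth storages junctions delay_n)) := by
  intro nodes
  induction nodes with
  | nil => intro _; rfl
  | cons n t ih =>
    intro hpre
    have hn := pvWidth_some storages junctions delay_n n (hpre n List.mem_cons_self)
    rw [List.mapM_cons, hn, ih (fun m hm => hpre m (List.mem_cons_of_mem _ hm))]
    rfl

-- Source B's manual prefix loop builds exactly the scanl of running sums
theorem pvStarts : ∀ (ws : List Int) (pre : List Int) (a : Int),
    ws.foldl (fun s w => s ++ [(PySem.List.pyGet? s (-1)).getD 0 + w]) (pre ++ [a])
      = pre ++ ws.scanl (· + ·) a := by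
  intro ws
  induction ws with
  | nil => intro pre a; simp [List.scanl]
  | cons w t ih =>
    intro pre a
    rw [List.foldl_cons, PySem.List.pyGet?_neg_one_append_singleton]
    have h1 : (pre ++ [a]) ++ [a + w] = (pre ++ [a]) ++ [a + w] := rfl
    rw [show (pre ++ [a]) ++ [(some a).getD 0 + w] = (pre ++ [a]) ++ [a + w] from rfl,
        ih (pre ++ [a]) (a + w)]
    simp [List.scanl]

theorem pvFoldB (storages junctions : List String) (delay_n : List Int) :
    ∀ (nodes : List String) (d : PySem.Dict String (Int × Int)) (acc : Int),
    ((nodes.zip (((nodes.map (pvWidth storages junctions delay_n)).scanl (· + ·) acc).zip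
        (nodes.map (pvWidth storages junctions delay_n)))).foldl
      (fun (d : PySem.Dict String (Int × Int)) p => d.insert p.1 (p.2.1, p.2.1 + p.2.2 - 1)) d)
      = pvBuild storages junctions delay_n d acc nodes := by
  intro nodes
  induction nodes with
  | nil => intro d acc; simp [pvBuild]
  | cons n t ih =>
    intro d acc
    simp only [List.map_cons, List.scanl_cons, List.zip_cons_cons, List.foldl_cons]
    rw [ih]
    rfl

-- ===== VERDICT (by name: the statement is the Claim_ definition above) =====
theorem form_node_index_spec : Claim_equal_form_node_index := by
  intro nodes storages junctions links delay_n _ hpre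
  unfold Spec_form_node_index form_node_index form_node_index_alt
  obtain ⟨accF, hF⟩ := pvFoldA storages junctions delay_n nodes hpre PySem.Dict.empty 0
  rw [hF, pvMapM storages junctions delay_n nodes hpre]
  simp only [Option.map_some, Option.getD_some]
  rw [show ([(0:Int)] : List Int) = [] ++ [(0:Int)] from rfl, pvStarts, List.nil_append,
      pvFoldB storages junctions delay_n nodes PySem.Dict.empty 0]
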